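-- pv_equiv track=rewrite | github.com/jmsb505/Gen_Algorithm_No_Elitism | Proyecto3Main.py | getDatabaseRow
-- ===== SOURCE A (Python) =====
-- def getManhattanCost(matriz):
--     manhattanDistance = 0
--     for i, item in enumerate(matriz):
--         prev_row, prev_col = int(i / 3), i % 3
--         goal_row, goal_col = int(item / 3), item % 3
--         manhattanDistance += abs(prev_row - goal_row) + abs(prev_col - goal_col)
--     return manhattanDistance
--
-- def getDatabaseRow(matriz):
--     firstPattern = [0, 0, 0, 0, 0, 0, 0, 0, 0]
--     secondPattern = [0, 0, 0, 0, 0, 0, 0, 0, 0]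
--     for i, element in enumerate(matriz):
--         if int(element) <= 4:
--             firstPattern[i] = int(element)
--         else:
--             secondPattern[i] = int(element)
--     return firstPattern, secondPattern, getManhattanCost(firstPattern), getManhattanCost(secondPattern)
-- ===== SOURCE B (Python) =====
-- def getDatabaseRow(matriz):
--     def man(i, v):
--         # Manhattan distance of a tile with value v sitting at slot i of a 3x3 board
--         return abs(int(i / 3) - int(v / 3)) + abs(i % 3 - v % 3)
--     firstPattern = [0] * 9
--     secondPattern = [0] * 9
--     firstCost = 0
--     secondCost = 0
--     for i, element in enumerate(matriz):
--         e = int(element)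
--         if e <= 4:
--             firstPattern[i] = e
--             firstCost += man(i, e)
--             secondCost += man(i, 0)
--         else:
--             secondPattern[i] = e
--             secondCost += man(i, e)
--             firstCost += man(i, 0)
--     for i in range(len(matriz), 9):
--         z = man(i, 0)
--         firstCost += z
--         secondCost += z
--     return firstPattern, secondPattern, firstCost, secondCost
-- ===== Notes on version B (the rewrite author's own statement) =====
-- stated objective: alternative
-- what changed: Fuses A's splitting loop and A's two separate full-pattern Manhattan-cost scans into one accumulating pass that places each tile and updates both costs as it goes (plus a short sweep over the pattern slots the input leaves empty); Pre_ only excludes lists longer than 9, on which A raises IndexError.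
import Mathlib
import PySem

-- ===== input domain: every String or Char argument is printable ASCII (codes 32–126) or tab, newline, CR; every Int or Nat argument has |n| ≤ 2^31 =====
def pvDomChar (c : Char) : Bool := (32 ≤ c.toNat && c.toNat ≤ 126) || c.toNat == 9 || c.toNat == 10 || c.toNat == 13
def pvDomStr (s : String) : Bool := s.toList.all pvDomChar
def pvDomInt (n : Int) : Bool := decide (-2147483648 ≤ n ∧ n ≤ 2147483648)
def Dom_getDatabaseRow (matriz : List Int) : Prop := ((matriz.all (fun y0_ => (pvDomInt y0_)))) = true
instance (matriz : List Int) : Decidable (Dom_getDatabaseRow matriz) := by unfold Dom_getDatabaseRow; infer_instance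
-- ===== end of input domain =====

-- B fuses A's splitting loop and A's two subsequent 9-slot Manhattan-cost scans into a
-- single accumulating pass (objective: alternative decomposition, same cost).

-- ===== PORT A =====
-- per-item Manhattan term of A's loop body; int(item/3) is truncating division (exact on Dom, |item| ≤ 2^31)
def pvMan (i : Nat) (item : Int) : Int :=
  |((i / 3 : Nat) : Int) - Int.tdiv item 3| + |((i % 3 : Nat) : Int) - PySem.Int.mod item 3|

-- the 'for i, item in enumerate(matriz)' accumulator loop of getManhattanCost
def pvManGo : List Int → Nat → Int → Int
  | [], _, acc => acc
  | item :: rest, i, acc => pvManGo rest (i + 1) (acc + pvMan i item)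

def getManhattanCost (matriz : List Int) : Int := pvManGo matriz 0 0

-- the 'for i, element in enumerate(matriz)' splitting loop of getDatabaseRow
def pvFillGo : List Int → Nat → List Int → List Int → List Int × List Int
  | [], _, f, s => (f, s)
  | e :: rest, i, f, s =>
      if e ≤ 4 then pvFillGo rest (i + 1) (f.set i e) s
      else pvFillGo rest (i + 1) f (s.set i e)

def getDatabaseRow (matriz : List Int) : List Int × List Int × Int × Int :=
  let firstPattern : List Int := [0, 0, 0, 0, 0, 0, 0, 0, 0]
  let secondPattern : List Int := [0, 0, 0, 0, 0, 0, 0, 0, 0]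
  let p := pvFillGo matriz 0 firstPattern secondPattern
  (p.1, p.2, getManhattanCost p.1, getManhattanCost p.2)

-- ===== PORT B =====
-- Source B's helper man(i, v); int(_/3) is truncating division (exact on Dom, |v| ≤ 2^31; i is 0..8)
def pvManB (i : Nat) (v : Int) : Int :=
  |((i / 3 : Nat) : Int) - Int.tdiv v 3| + |((i % 3 : Nat) : Int) - PySem.Int.mod v 3|

-- Source B's fused 'for i, element in enumerate(matriz)' loop
def pvAltGo : List Int → Nat → List Int → List Int → Int → Int → List Int × List Int × Int × Int
  | [], _, f, s, fc, sc => (f, s, fc, sc)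
  | e :: rest, i, f, s, fc, sc =>
      if e ≤ 4 then pvAltGo rest (i + 1) (f.set i e) s (fc + pvManB i e) (sc + pvManB i 0)
      else pvAltGo rest (i + 1) f (s.set i e) (fc + pvManB i 0) (sc + pvManB i e)

-- Source B's trailing 'for i in range(len(matriz), 9)' sweep over the still-empty slots
def getDatabaseRow_alt (matriz : List Int) : List Int × List Int × Int × Int :=
  let r := pvAltGo matriz 0 (List.replicate 9 0) (List.replicate 9 0) 0 0
  let t := (List.range' matriz.length (9 - matriz.length)).foldl
      (fun cs k => (cs.1 + pvManB k 0, cs.2 + pvManB k 0)) (r.2.2.1, r.2.2.2)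
  (r.1, r.2.1, t.1, t.2)

-- ===== PRECONDITION & SPEC =====
-- Pre_ excludes only the inputs on which A raises: a list longer than 9 makes 'pattern[i] = …' IndexError.
def Pre_getDatabaseRow (matriz : List Int) : Prop := matriz.length ≤ 9
instance (matriz : List Int) : Decidable (Pre_getDatabaseRow matriz) := by unfold Pre_getDatabaseRow; infer_instance
def pvWitness_getDatabaseRow : List Int := [8, 0, 3, 5, 1, 6, 2, 7, 4]

def Spec_getDatabaseRow (matriz : List Int) (out : List Int × List Int × Int × Int) : Prop := out = getDatabaseRow_alt matriz
instance (matriz : List Int) (out : List Int × List Int × Int × Int) : Decidable (Spec_getDatabaseRow matriz out) := by unfold Spec_getDatabaseRow; infer_instance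

-- ===== CLAIM (what is proved, stated in full; the proofs are below) =====
def Claim_equal_getDatabaseRow : Prop := ∀ (matriz : List Int), Dom_getDatabaseRow matriz → Pre_getDatabaseRow matriz → Spec_getDatabaseRow matriz (getDatabaseRow matriz)

-- ===== LEMMAS AND PROOFS =====

theorem pvManB_eq_pvMan (i : Nat) (v : Int) : pvManB i v = pvMan i v := rfl

theorem pvManGo_acc (l : List Int) : ∀ (i : Nat) (acc : Int),
    pvManGo l i acc = acc + pvManGo l i 0 := by
  induction l with
  | nil => intro i acc; simp [pvManGo]
  | cons x t ih =>
      intro i acc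
      simp only [pvManGo]
      rw [ih (i+1) (acc + pvMan i x), ih (i+1) (0 + pvMan i x)]
      ring

theorem pvManGo_cons (x : Int) (t : List Int) (i : Nat) :
    pvManGo (x :: t) i 0 = pvMan i x + pvManGo t (i + 1) 0 := by
  simp only [pvManGo]
  rw [pvManGo_acc]
  ring_nf

theorem pvManGo_append (l1 : List Int) : ∀ (l2 : List Int) (i : Nat),
    pvManGo (l1 ++ l2) i 0 = pvManGo l1 i 0 + pvManGo l2 (i + l1.length) 0 := by
  induction l1 with
  | nil => intro l2 i; simp [pvManGo]
  | cons x t ih =>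
      intro l2 i
      rw [List.cons_append, pvManGo_cons, pvManGo_cons, ih l2 (i+1)]
      simp only [List.length_cons]
      have : i + 1 + t.length = i + (t.length + 1) := by omega
      rw [this]
      ring

theorem drop_cons_of_getD (L : List Int) (i : Nat) (x : Int) (h : i < L.length)
    (hx : L.getD i 0 = x) : L.drop i = x :: L.drop (i + 1) := by
  rw [List.drop_eq_getElem_cons h]
  rw [List.getD_eq_getElem?_getD, List.getElem?_eq_getElem h] at hx
  simp only [Option.getD_some] at hx
  rw [hx]

-- pvFillGo leaves every position outside [i, i + length) untouched
theorem pvFillGo_getD_out (l : List Int) : ∀ (i j : Nat) (f s : List Int),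
    (j < i ∨ i + l.length ≤ j) →
    (pvFillGo l i f s).1.getD j 0 = f.getD j 0 ∧ (pvFillGo l i f s).2.getD j 0 = s.getD j 0 := by
  induction l with
  | nil => intro i j f s h; simp [pvFillGo]
  | cons e t ih =>
      intro i j f s h
      simp only [List.length_cons] at h
      simp only [pvFillGo]
      split
      · have := ih (i+1) j (f.set i e) s (by omega)
        refine ⟨?_, this.2⟩
        rw [this.1, List.getD_eq_getElem?_getD, List.getElem?_set_ne (by omega : i ≠ j),
            ← List.getD_eq_getElem?_getD]
      · have := ih (i+1) j f (s.set i e) (by omega)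
        refine ⟨this.1, ?_⟩
        rw [this.2, List.getD_eq_getElem?_getD, List.getElem?_set_ne (by omega : i ≠ j),
            ← List.getD_eq_getElem?_getD]

theorem pvFillGo_length (l : List Int) : ∀ (i : Nat) (f s : List Int),
    (pvFillGo l i f s).1.length = f.length ∧ (pvFillGo l i f s).2.length = s.length := by
  induction l with
  | nil => intro i f s; simp [pvFillGo]
  | cons e t ih =>
      intro i f s
      simp only [pvFillGo]
      split
      · have := ih (i+1) (f.set i e) s; simpa using this
      · have := ih (i+1) f (s.set i e); simpa using this

-- main invariant: the fused loop's running costs pick up exactly the Manhattan terms of the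
-- final patterns over the positions it visits
theorem pvAltGo_eq (l : List Int) : ∀ (i : Nat) (f s : List Int) (fc sc : Int),
    f.length = 9 → s.length = 9 → i + l.length ≤ 9 →
    (∀ j, i ≤ j → f.getD j 0 = 0) → (∀ j, i ≤ j → s.getD j 0 = 0) →
    pvAltGo l i f s fc sc =
      ((pvFillGo l i f s).1, (pvFillGo l i f s).2,
       fc + pvManGo (((pvFillGo l i f s).1.drop i).take l.length) i 0,
       sc + pvManGo (((pvFillGo l i f s).2.drop i).take l.length) i 0) := by
  induction l with
  | nil =>
      intro i f s fc sc _ _ _ _ _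
      simp [pvAltGo, pvFillGo, pvManGo]
  | cons e rest ih =>
      intro i f s fc sc hf hs hlen hf0 hs0
      have hi : i < 9 := by simp [List.length] at hlen; omega
      simp only [pvAltGo, pvFillGo]
      split
      · -- e ≤ 4 : goes into the first pattern
        rw [ih (i+1) (f.set i e) s (fc + pvManB i e) (sc + pvManB i 0)
              (by simp [hf]) hs (by simp at hlen ⊢; omega)
              (fun j hj => by
                rw [List.getD_eq_getElem?_getD, List.getElem?_set_ne (by omega : i ≠ j),
                    ← List.getD_eq_getElem?_getD]
                exact hf0 j (by omega))
              (fun j hj => hs0 j (by omega))]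
        have hFlen : (pvFillGo rest (i+1) (f.set i e) s).1.length = 9 := by
          rw [(pvFillGo_length rest (i+1) (f.set i e) s).1]; simp [hf]
        have hSlen : (pvFillGo rest (i+1) (f.set i e) s).2.length = 9 := by
          rw [(pvFillGo_length rest (i+1) (f.set i e) s).2, hs]
        have hFi : (pvFillGo rest (i+1) (f.set i e) s).1.getD i 0 = e := by
          rw [(pvFillGo_getD_out rest (i+1) i (f.set i e) s (Or.inl (by omega))).1,
              List.getD_eq_getElem?_getD, List.getElem?_set_self (by omega)]
          rfl
        have hSi : (pvFillGo rest (i+1) (f.set i e) s).2.getD i 0 = 0 := by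
          rw [(pvFillGo_getD_out rest (i+1) i (f.set i e) s (Or.inl (by omega))).2]
          exact hs0 i (le_refl i)
        rw [drop_cons_of_getD (pvFillGo rest (i+1) (f.set i e) s).1 i e (by omega) hFi,
            drop_cons_of_getD (pvFillGo rest (i+1) (f.set i e) s).2 i 0 (by omega) hSi,
            List.length_cons, List.take_succ_cons, List.take_succ_cons,
            pvManGo_cons, pvManGo_cons, pvManB_eq_pvMan, pvManB_eq_pvMan]
        refine Prod.ext rfl (Prod.ext rfl (Prod.ext ?_ ?_)) <;> simp <;> try ring
      · -- e > 4 : goes into the second pattern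
        rw [ih (i+1) f (s.set i e) (fc + pvManB i 0) (sc + pvManB i e)
              hf (by simp [hs]) (by simp at hlen ⊢; omega)
              (fun j hj => hf0 j (by omega))
              (fun j hj => by
                rw [List.getD_eq_getElem?_getD, List.getElem?_set_ne (by omega : i ≠ j),
                    ← List.getD_eq_getElem?_getD]
                exact hs0 j (by omega))]
        have hFlen : (pvFillGo rest (i+1) f (s.set i e)).1.length = 9 := by
          rw [(pvFillGo_length rest (i+1) f (s.set i e)).1, hf]
        have hSlen : (pvFillGo rest (i+1) f (s.set i e)).2.length = 9 := by
          rw [(pvFillGo_length rest (i+1) f (s.set i e)).2]; simp [hs]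
        have hFi : (pvFillGo rest (i+1) f (s.set i e)).1.getD i 0 = 0 := by
          rw [(pvFillGo_getD_out rest (i+1) i f (s.set i e) (Or.inl (by omega))).1]
          exact hf0 i (le_refl i)
        have hSi : (pvFillGo rest (i+1) f (s.set i e)).2.getD i 0 = e := by
          rw [(pvFillGo_getD_out rest (i+1) i f (s.set i e) (Or.inl (by omega))).2,
              List.getD_eq_getElem?_getD, List.getElem?_set_self (by omega)]
          rfl
        rw [drop_cons_of_getD (pvFillGo rest (i+1) f (s.set i e)).1 i 0 (by omega) hFi,
            drop_cons_of_getD (pvFillGo rest (i+1) f (s.set i e)).2 i e (by omega) hSi,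
            List.length_cons, List.take_succ_cons, List.take_succ_cons,
            pvManGo_cons, pvManGo_cons, pvManB_eq_pvMan, pvManB_eq_pvMan]
        refine Prod.ext rfl (Prod.ext rfl (Prod.ext ?_ ?_)) <;> simp <;> try ring

-- the trailing sweep adds the Manhattan terms of n zero slots starting at k, to both costs
theorem pvTail_eq (n : Nat) : ∀ (k : Nat) (fc sc : Int),
    (List.range' k n).foldl (fun cs j => (cs.1 + pvManB j 0, cs.2 + pvManB j 0)) (fc, sc) =
      (fc + pvManGo (List.replicate n 0) k 0, sc + pvManGo (List.replicate n 0) k 0) := by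
  induction n with
  | zero => intro k fc sc; simp [pvManGo]
  | succ n ih =>
      intro k fc sc
      rw [List.range'_succ, List.foldl_cons, ih (k+1), List.replicate_succ, pvManGo_cons,
          pvManB_eq_pvMan]
      refine Prod.ext ?_ ?_ <;> simp <;> ring

-- an all-zero suffix is a replicate
theorem drop_eq_replicate (F : List Int) (k : Nat) (hk : k ≤ F.length)
    (h0 : ∀ j, k ≤ j → F.getD j 0 = 0) :
    F.drop k = List.replicate (F.length - k) 0 := by
  apply List.ext_getElem
  · simp
  · intro j hj hj2
    simp only [List.getElem_drop, List.getElem_replicate]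
    have := h0 (k + j) (by omega)
    rw [List.getD_eq_getElem?_getD, List.getElem?_eq_getElem (by simp at hj; omega)] at this
    simpa using this

-- ===== VERDICT (by name: the statement is the Claim_ definition above) =====
theorem getDatabaseRow_spec : Claim_equal_getDatabaseRow := by
  intro matriz _ hpre
  have hp9 : matriz.length ≤ 9 := hpre
  have hrep : ∀ j : Nat, (List.replicate 9 (0 : Int)).getD j 0 = 0 := by
    intro j
    by_cases h : j < 9
    · exact List.getD_replicate _ h
    · rw [List.getD_eq_getElem?_getD, List.getElem?_eq_none (by simp; omega)]
      rfl
  have hz : ([0, 0, 0, 0, 0, 0, 0, 0, 0] : List Int) = List.replicate 9 0 := rfl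
  simp only [Spec_getDatabaseRow, getDatabaseRow, getDatabaseRow_alt, getManhattanCost, hz]
  rw [pvAltGo_eq matriz 0 _ _ 0 0 rfl rfl (by simpa using hpre)
        (fun j _ => hrep j) (fun j _ => hrep j)]
  set P := pvFillGo matriz 0 (List.replicate 9 0) (List.replicate 9 0) with hP
  have hlenF : P.1.length = 9 := by
    rw [hP, (pvFillGo_length matriz 0 _ _).1]; simp
  have hlenS : P.2.length = 9 := by
    rw [hP, (pvFillGo_length matriz 0 _ _).2]; simp
  have h0F : ∀ j, matriz.length ≤ j → P.1.getD j 0 = 0 := fun j hj => by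
    rw [hP, (pvFillGo_getD_out matriz 0 j _ _ (Or.inr (by omega))).1]; exact hrep j
  have h0S : ∀ j, matriz.length ≤ j → P.2.getD j 0 = 0 := fun j hj => by
    rw [hP, (pvFillGo_getD_out matriz 0 j _ _ (Or.inr (by omega))).2]; exact hrep j
  simp only [List.drop_zero]
  rw [pvTail_eq]
  have hsplit : ∀ (L : List Int), L.length = 9 → (∀ j, matriz.length ≤ j → L.getD j 0 = 0) →
      pvManGo L 0 0 =
        pvManGo (L.take matriz.length) 0 0 + pvManGo (List.replicate (9 - matriz.length) 0) matriz.length 0 := by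
    intro L hL h0
    conv_lhs => rw [← List.take_append_drop matriz.length L]
    rw [pvManGo_append, drop_eq_replicate L matriz.length (by omega) h0, hL,
        List.length_take, hL]
    have : min matriz.length 9 = matriz.length := by omega
    rw [this]
    simp
  rw [hsplit P.1 hlenF h0F, hsplit P.2 hlenS h0S]
  simp
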